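-- pv_equiv track=rewrite | github.com/cppp-project/rubisco | rubisco/cli/cefs_dbg/completer.py | get_left_longest_common_subsequence
-- ===== SOURCE A (Python) =====
-- from collections.abc import Iterable, Sequence
--
-- def get_left_longest_common_subsequence(
--     text: str,
--     candidates: Sequence[str],
-- ) -> list[str]:
--     """Get the left longest common subsequence of text and candidates.
--
--     Args:
--         text (str): The text to compare.
--         candidates (list[str]): The candidates to compare.
--
--     Returns:
--         list[str]: The sorted candidates by left lcs length,
--                   then by candidate length, then alphabetically.
--
--     """
--     if not text or not candidates:
--         return []
--
--     def lcs_length(a: str, b: str) -> int: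
--         """Calculate the length of the left-aligned lcs."""
--         max_len = 0
--         len_a, len_b = len(a), len(b)
--         # Create a DP table initialized to 0
--         dp = [[0] * (len_b + 1) for _ in range(len_a + 1)]
--
--         for i in range(1, len_a + 1):
--             for j in range(1, len_b + 1):
--                 if a[i - 1] == b[j - 1]:
--                     dp[i][j] = dp[i - 1][j - 1] + 1
--                     max_len = max(max_len, dp[i][j])
--                 else:
--                     dp[i][j] = 0  # Reset for left-aligned property
--         return max_len
--
--     # Calculate LCS length for each candidate
--     candidates_with_lcs = [
--         (candidate, lcs_length(text.lower(), candidate.lower()))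
--         for candidate in candidates
--     ]
--
--     # Filter out candidates with no match
--     candidates_with_lcs = [x for x in candidates_with_lcs if x[1] > 0]
--
--     # Sort by:
--     # 1. LCS length (descending)
--     # 2. Candidate length (ascending - prefer shorter matches when LCS is equal)
--     # 3. Alphabetical order.
--     candidates_with_lcs.sort(key=lambda x: (-x[1], len(x[0]), x[0].lower()))
--
--     return [candidate for candidate, _ in candidates_with_lcs]
-- ===== SOURCE B (Python) =====
-- def get_left_longest_common_subsequence(text, candidates):
--     """Rank candidates by longest common substring with text (case-insensitive),
--     ties broken by candidate length then alphabetically (lowercased)."""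
--     if not text or not candidates:
--         return []
--     t = text.lower()
--     n = len(t)
--
--     def lcs_length(b):
--         # Scan each diagonal of the (implicit) comparison grid, keeping only the
--         # current run of consecutive matches: no DP table is ever materialised.
--         best = 0
--         m = len(b)
--         for d in range(-(m - 1), n):  # d = i - j, one diagonal per offset
--             run = 0
--             j = max(0, -d)
--             i = j + d
--             while i < n and j < m:
--                 if t[i] == b[j]:
--                     run += 1
--                     if run > best:
--                         best = run
--                 else:
--                     run = 0
--                 i += 1
--                 j += 1
--         return best
--
--     scored = []
--     for c in candidates:
--         s = lcs_length(c.lower())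
--         if s > 0:
--             scored.append((c, s))
--     scored.sort(key=lambda x: (-x[1], len(x[0]), x[0].lower()))
--     return [c for c, _ in scored]
-- ===== Notes on version B (the rewrite author's own statement) =====
-- stated objective: alternative
-- what changed: B computes the longest-common-substring score by scanning each diagonal of the implicit comparison grid with a single run-of-matches counter (no DP table or rows are ever built, a different traversal order proved order-independent), and builds the scored list in one explicit accumulating loop instead of A's map-then-filter pipeline.
import Mathlib
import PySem

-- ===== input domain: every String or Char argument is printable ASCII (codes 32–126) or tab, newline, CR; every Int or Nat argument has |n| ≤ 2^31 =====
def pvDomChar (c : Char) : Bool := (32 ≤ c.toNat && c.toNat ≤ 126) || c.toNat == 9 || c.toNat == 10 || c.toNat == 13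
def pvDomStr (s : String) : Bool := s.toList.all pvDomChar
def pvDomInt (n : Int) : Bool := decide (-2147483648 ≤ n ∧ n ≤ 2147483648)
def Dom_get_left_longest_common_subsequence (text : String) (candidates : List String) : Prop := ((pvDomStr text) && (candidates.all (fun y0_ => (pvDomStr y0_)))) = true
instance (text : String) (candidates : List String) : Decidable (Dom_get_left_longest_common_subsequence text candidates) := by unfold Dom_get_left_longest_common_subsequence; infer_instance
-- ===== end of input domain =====

-- B scores each candidate by walking the diagonals of the implicit comparison grid
-- with one run-of-matches counter (no DP table), and gathers the scored candidates in
-- one accumulating loop; the return value is proved equal to A's on all inputs.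

-- ===== PORT A =====
-- inner loop body of A's lcs_length: one iteration of `for j in range(1, len_b+1)`
-- (state = (dp, max_len)); indices are Python ints, in-range here, so pyGetD/pySetD are exact
def pvA_innerStep (a b : List Char) (i : Int) (t : List (List Int) × Int) (j : Int) :
    List (List Int) × Int :=
  if PySem.List.pyGetD a (i - 1) ' ' == PySem.List.pyGetD b (j - 1) ' ' then
    let v := PySem.List.pyGetD (PySem.List.pyGetD t.1 (i - 1) []) (j - 1) 0 + 1
    (PySem.List.pySetD t.1 i (PySem.List.pySetD (PySem.List.pyGetD t.1 i []) j v), max t.2 v)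
  else
    (PySem.List.pySetD t.1 i (PySem.List.pySetD (PySem.List.pyGetD t.1 i []) j 0), t.2)

-- A's nested helper lcs_length (DP table; `[0]*(len_b+1)` = replicate, exact since len_b+1 ≥ 0)
def pvA_lcs (a b : List Char) : Int :=
  let lenA : Int := a.length
  let lenB : Int := b.length
  let dp : List (List Int) :=
    (PySem.List.pyRange 0 (lenA + 1) 1).map (fun _ => List.replicate (lenB + 1).toNat (0 : Int))
  ((PySem.List.pyRange 1 (lenA + 1) 1).foldl
    (fun s i => (PySem.List.pyRange 1 (lenB + 1) 1).foldl (pvA_innerStep a b i) s)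
    (dp, (0 : Int))).2

def get_left_longest_common_subsequence (text : String) (candidates : List String) : List String :=
  if text.toList = [] ∨ candidates = [] then []
  else
    let candidates_with_lcs := candidates.map
      (fun c => (c, pvA_lcs (PySem.Chars.lower text.toList) (PySem.Chars.lower c.toList)))
    let candidates_with_lcs := candidates_with_lcs.filter (fun x => decide (x.2 > 0))
    (PySem.List.sorted candidates_with_lcs
      (fun x => toLex (-x.2, toLex ((x.1.toList.length : Int), PySem.Chars.lower x.1.toList)))
      false).map (fun x => x.1)

-- ===== PORT B =====
-- B's inner `while i < n and j < m` walk along one diagonal: run of consecutive matches,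
-- best updated when the run grows; i, j stay ≥ 0 so pyGetD is exact
def pvDiagWalk (t b : List Char) (i j run best : Int) : Int :=
  if h : i < (t.length : Int) ∧ j < (b.length : Int) then
    if PySem.List.pyGetD t i ' ' == PySem.List.pyGetD b j ' ' then
      let run' := run + 1
      pvDiagWalk t b (i + 1) (j + 1) run' (if run' > best then run' else best)
    else
      pvDiagWalk t b (i + 1) (j + 1) 0 best
  else best
termination_by ((t.length : Int) - i).toNat
decreasing_by all_goals omega

-- B's lcs_length: `for d in range(-(m-1), n)` over diagonal offsets d = i - j
def pvDiag_lcs (t b : List Char) : Int :=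
  let n : Int := t.length
  let m : Int := b.length
  (PySem.List.pyRange (-(m - 1)) n 1).foldl
    (fun best d =>
      let j := max 0 (-d)
      pvDiagWalk t b (j + d) j 0 best) 0

def get_left_longest_common_subsequence_alt (text : String) (candidates : List String) : List String :=
  if text.toList = [] ∨ candidates = [] then []
  else
    let t := PySem.Chars.lower text.toList
    let scored := candidates.foldl
      (fun acc c =>
        let s := pvDiag_lcs t (PySem.Chars.lower c.toList)
        if s > 0 then acc ++ [(c, s)] else acc) []
    (PySem.List.sorted scored
      (fun x => toLex (-x.2, toLex ((x.1.toList.length : Int), PySem.Chars.lower x.1.toList)))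
      false).map (fun x => x.1)

-- ===== PRECONDITION & SPEC =====
def Spec_get_left_longest_common_subsequence (text : String) (candidates : List String) (out : List String) : Prop := out = get_left_longest_common_subsequence_alt text candidates
instance (text : String) (candidates : List String) (out : List String) : Decidable (Spec_get_left_longest_common_subsequence text candidates out) := by unfold Spec_get_left_longest_common_subsequence; infer_instance

-- ===== CLAIM (what is proved, stated in full; the proofs are below) =====
def Claim_equal_get_left_longest_common_subsequence : Prop := ∀ (text : String) (candidates : List String), Dom_get_left_longest_common_subsequence text candidates → Spec_get_left_longest_common_subsequence text candidates (get_left_longest_common_subsequence text candidates)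

-- ===== LEMMAS AND PROOFS =====

-- reference quantity: csuf a b i j = length of the longest common suffix of a[:i] and b[:j]
-- (A's dp[i][j]); both lcs helpers are proved to compute its maximum over the grid
def csuf (a b : List Char) : Nat → Nat → Int
  | i + 1, j + 1 => if a.getD i ' ' == b.getD j ' ' then csuf a b i j + 1 else 0
  | _, _ => 0

lemma csuf_zero_left (a b : List Char) (j : Nat) : csuf a b 0 j = 0 := by cases j <;> rfl

lemma csuf_zero_right (a b : List Char) (i : Nat) : csuf a b i 0 = 0 := by cases i <;> rfl

lemma csuf_succ (a b : List Char) (i j : Nat) :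
    csuf a b (i + 1) (j + 1) = if a.getD i ' ' == b.getD j ' ' then csuf a b i j + 1 else 0 := rfl

lemma csuf_nonneg (a b : List Char) (i j : Nat) : 0 ≤ csuf a b i j := by
  induction i generalizing j with
  | zero => simp [csuf_zero_left]
  | succ i ih =>
    cases j with
    | zero => simp [csuf_zero_right]
    | succ j =>
      rw [csuf_succ]
      split_ifs with h
      · have := ih j; omega
      · omega

-- "r is the maximum of csuf over the whole grid"
def pvGridMax (a b : List Char) (r : Int) : Prop :=
  0 ≤ r ∧ (∀ i j, i ≤ a.length → j ≤ b.length → csuf a b i j ≤ r) ∧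
    (∃ i j, i ≤ a.length ∧ j ≤ b.length ∧ r = csuf a b i j)

lemma pvGridMax_unique (a b : List Char) (r s : Int) (hr : pvGridMax a b r) (hs : pvGridMax a b s) : r = s := by
  obtain ⟨-, hr2, i, j, hi, hj, hr3⟩ := hr
  obtain ⟨-, hs2, i', j', hi', hj', hs3⟩ := hs
  have h1 := hs2 i j hi hj
  have h2 := hr2 i' j' hi' hj'
  omega

-- ---------- A side: the table fold simulated by a rolling row ----------

-- one rolling-row step (proof-side reference, used only to restate A's fold)
def pvRollRow (ca : Char) (b : List Char) (prev : List Int) (best : Int) :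
    List Int × Int :=
  (prev.zip b).foldl
    (fun s pc =>
      let v := if ca == pc.2 then pc.1 + 1 else 0
      (s.1 ++ [v], if v > s.2 then v else s.2))
    ([0], best)

def pvRoll_lcs (a b : List Char) : Int :=
  (a.foldl (fun s ca => pvRollRow ca b s.1 s.2)
    (List.replicate (b.length + 1) (0 : Int), (0 : Int))).2

lemma foldl_append_max {α : Type} (g : α → Int) (l : List α) (init : List Int) (b0 : Int) :
    l.foldl (fun s x => (s.1 ++ [g x], if g x > s.2 then g x else s.2)) (init, b0)
    = (init ++ l.map g, (l.map g).foldl (fun acc v => max acc v) b0) := by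
  induction l generalizing init b0 with
  | nil => simp
  | cons x xs ih =>
    simp only [List.foldl_cons, List.map_cons]
    rw [ih]
    have : (if g x > b0 then g x else b0) = max b0 (g x) := by
      by_cases h : g x > b0
      · simp [h, max_eq_right (le_of_lt h)]
      · simp [h, max_eq_left (not_lt.mp h)]
    simp [this]

lemma pvRollRow_eq (ca : Char) (b : List Char) (prev : List Int) (best : Int) :
    pvRollRow ca b prev best
    = ((0 : Int) :: (prev.zip b).map (fun pc => if ca == pc.2 then pc.1 + 1 else 0),
       ((prev.zip b).map (fun pc => if ca == pc.2 then pc.1 + 1 else 0)).foldl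
         (fun acc v => max acc v) best) := by
  unfold pvRollRow
  rw [foldl_append_max (fun pc => if ca == pc.2 then pc.1 + 1 else 0) (prev.zip b) [0] best]
  simp

lemma le_foldl_max' (l : List Int) (b0 : Int) : b0 ≤ l.foldl (fun acc v => max acc v) b0 := by
  induction l generalizing b0 with
  | nil => simp
  | cons x xs ih => exact le_trans (le_max_left b0 x) (ih (max b0 x))

lemma mem_le_foldl_max (l : List Int) (b0 x : Int) (hx : x ∈ l) :
    x ≤ l.foldl (fun acc v => max acc v) b0 := by
  induction l generalizing b0 with
  | nil => cases hx
  | cons y ys ih =>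
    rcases List.mem_cons.mp hx with h | h
    · subst h
      exact le_trans (le_max_right b0 x) (le_foldl_max' ys (max b0 x))
    · exact ih (max b0 y) h

lemma foldl_max_cases (l : List Int) (b0 : Int) :
    l.foldl (fun acc v => max acc v) b0 = b0 ∨ l.foldl (fun acc v => max acc v) b0 ∈ l := by
  induction l generalizing b0 with
  | nil => left; rfl
  | cons y ys ih =>
    rcases ih (max b0 y) with h | h
    · rcases le_total y b0 with hy | hy
      · left; simpa [max_eq_left hy] using h
      · right; simp only [List.foldl_cons] at *; rw [h, max_eq_right hy]; simp
    · right; simp only [List.foldl_cons]; exact List.mem_cons_of_mem _ h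

-- simulation of A's inner j-loop
lemma inner_sim (a b : List Char) (i : Nat) (hi1 : 1 ≤ i) (hin : i ≤ a.length) :
    ∀ (t j : Nat) (dp : List (List Int)) (maxl : Int) (cur : List Int),
    1 ≤ j → j + t = b.length + 1 →
    dp.length = a.length + 1 →
    (dp.getD (i - 1) []).length = b.length + 1 →
    dp.getD i [] = cur ++ List.replicate t 0 → cur.length = j →
    0 ≤ maxl →
    (PySem.List.pyRange (j : Int) ((b.length : Int) + 1) 1).foldl
        (pvA_innerStep a b (i : Int)) (dp, maxl)
    = (dp.set i (cur ++ (((dp.getD (i - 1) []).zip b).drop (j - 1)).map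
          (fun pc => if a.getD (i - 1) ' ' == pc.2 then pc.1 + 1 else 0)),
       ((((dp.getD (i - 1) []).zip b).drop (j - 1)).map
          (fun pc => if a.getD (i - 1) ' ' == pc.2 then pc.1 + 1 else 0)).foldl
         (fun acc v => max acc v) maxl) := by
  intro t
  induction t with
  | zero =>
    intro j dp maxl cur hj1 hjt hdplen hprevlen hrow hcur hmax
    have hj : j = b.length + 1 := by omega
    subst hj
    rw [PySem.List.pyRange_one_eq_nil (by omega), List.foldl_nil]
    have hzlen : ((dp.getD (i - 1) []).zip b).length = b.length := by
      rw [List.length_zip, hprevlen]; omega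
    have hdrop : ((dp.getD (i - 1) []).zip b).drop (b.length + 1 - 1) = [] := by
      apply List.drop_eq_nil_of_le; omega
    have hcur' : dp.getD i [] = cur := by simpa using hrow
    have hilt : i < dp.length := by omega
    have hset : dp.set i cur = dp := by
      rw [← hcur', List.getD_eq_getElem dp [] hilt, List.set_getElem_self]
    rw [hdrop]
    simp [hset]
  | succ t ih =>
    intro j dp maxl cur hj1 hjt hdplen hprevlen hrow hcur hmax
    have hjm : j ≤ b.length := by omega
    have hilt : i < dp.length := by omega
    rw [PySem.List.pyRange_one_cons (by omega)]
    rw [List.foldl_cons]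
    have hia : ((i : Int) - 1) = ((i - 1 : Nat) : Int) := by push_cast [Nat.cast_sub hi1]; ring
    have hja : ((j : Int) - 1) = ((j - 1 : Nat) : Int) := by push_cast [Nat.cast_sub hj1]; ring
    have hjb : j - 1 < b.length := by omega
    have hjp : j - 1 < (dp.getD (i - 1) []).length := by omega
    have hzlen : ((dp.getD (i - 1) []).zip b).length = b.length := by
      rw [List.length_zip, hprevlen]; omega
    have hjz : j - 1 < ((dp.getD (i - 1) []).zip b).length := by omega
    have hdrop : ((dp.getD (i - 1) []).zip b).drop (j - 1)
        = ((dp.getD (i - 1) [])[j - 1], b[j - 1]) :: ((dp.getD (i - 1) []).zip b).drop (j - 1 + 1) := by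
      rw [List.drop_eq_getElem_cons hjz, List.getElem_zip]
    have hstep : pvA_innerStep a b (i : Int) (dp, maxl) (j : Int)
        = (dp.set i (cur ++ [if a.getD (i - 1) ' ' == b[j - 1] then (dp.getD (i - 1) [])[j - 1] + 1 else 0]
              ++ List.replicate t 0),
           max maxl (if a.getD (i - 1) ' ' == b[j - 1] then (dp.getD (i - 1) [])[j - 1] + 1 else 0)) := by
      unfold pvA_innerStep
      rw [hia, hja]
      simp only [PySem.List.pyGetD_natCast, PySem.List.pySetD_natCast]
      rw [List.getD_eq_getElem b ' ' hjb, List.getD_eq_getElem (dp.getD (i - 1) []) 0 hjp]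
      have hsetrow : ∀ v : Int, (cur ++ List.replicate (t + 1) (0 : Int)).set j v
          = cur ++ [v] ++ List.replicate t 0 := by
        intro v
        rw [← hcur]
        simp [List.replicate_succ]
      by_cases hc : a.getD (i - 1) ' ' == b[j - 1]
      · simp only [hc, if_true]
        rw [hrow, hsetrow]
      · simp only [hc, Bool.false_eq_true, if_false]
        rw [hrow, hsetrow, max_eq_left hmax]
    rw [hstep]
    have hset_len : (dp.set i (cur ++ [if a.getD (i - 1) ' ' == b[j - 1] then (dp.getD (i - 1) [])[j - 1] + 1 else 0] ++ List.replicate t 0)).length = a.length + 1 := by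
      simp [hdplen]
    have hgetprev : (dp.set i (cur ++ [if a.getD (i - 1) ' ' == b[j - 1] then (dp.getD (i - 1) [])[j - 1] + 1 else 0] ++ List.replicate t 0)).getD (i - 1) []
        = dp.getD (i - 1) [] := by
      simp [List.getD_eq_getElem?_getD, List.getElem?_set_ne (by omega : i ≠ i - 1)]
    have hgetrow : (dp.set i (cur ++ [if a.getD (i - 1) ' ' == b[j - 1] then (dp.getD (i - 1) [])[j - 1] + 1 else 0] ++ List.replicate t 0)).getD i []
        = (cur ++ [if a.getD (i - 1) ' ' == b[j - 1] then (dp.getD (i - 1) [])[j - 1] + 1 else 0]) ++ List.replicate t 0 := by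
      simp [List.getD_eq_getElem?_getD, hilt]
    have := ih (j + 1)
      (dp.set i (cur ++ [if a.getD (i - 1) ' ' == b[j - 1] then (dp.getD (i - 1) [])[j - 1] + 1 else 0] ++ List.replicate t 0))
      (max maxl (if a.getD (i - 1) ' ' == b[j - 1] then (dp.getD (i - 1) [])[j - 1] + 1 else 0))
      (cur ++ [if a.getD (i - 1) ' ' == b[j - 1] then (dp.getD (i - 1) [])[j - 1] + 1 else 0])
      (by omega) (by omega) (by simpa using hset_len)
      (by rw [hgetprev]; exact hprevlen)
      (by rw [hgetrow])
      (by simp [hcur]) (le_trans hmax (le_max_left _ _))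
    have hjc : ((j : Int) + 1) = ((j + 1 : Nat) : Int) := by push_cast; ring
    rw [hjc, this, hgetprev]
    have hj1' : j + 1 - 1 = j - 1 + 1 := by omega
    rw [hj1', hdrop]
    simp only [List.map_cons, List.foldl_cons, List.set_set]
    simp [List.append_assoc]

-- simulation of A's outer i-loop against the rolling fold
lemma outer_sim (a b : List Char) :
    ∀ (t i : Nat) (dp : List (List Int)) (maxl : Int) (prev : List Int),
    1 ≤ i → i + t = a.length + 1 →
    dp.length = a.length + 1 →
    dp.getD (i - 1) [] = prev → prev.length = b.length + 1 →
    (∀ k, i ≤ k → k ≤ a.length → dp.getD k [] = List.replicate (b.length + 1) 0) →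
    0 ≤ maxl →
    ((PySem.List.pyRange (i : Int) ((a.length : Int) + 1) 1).foldl
        (fun s ii => (PySem.List.pyRange 1 ((b.length : Int) + 1) 1).foldl
          (pvA_innerStep a b ii) s) (dp, maxl)).2
    = ((a.drop (i - 1)).foldl (fun s ca => pvRollRow ca b s.1 s.2) (prev, maxl)).2 := by
  intro t
  induction t with
  | zero =>
    intro i dp maxl prev hi1 hit hdplen hprev hprevlen hzeros hmax
    have hi : i = a.length + 1 := by omega
    subst hi
    have hnil : PySem.List.pyRange ((a.length + 1 : Nat) : Int) ((a.length : Int) + 1) 1 = [] :=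
      PySem.List.pyRange_one_eq_nil (by push_cast; omega)
    rw [hnil, List.foldl_nil, List.drop_eq_nil_of_le (by omega), List.foldl_nil]
  | succ t ih =>
    intro i dp maxl prev hi1 hit hdplen hprev hprevlen hzeros hmax
    have hin : i ≤ a.length := by omega
    have hilt : i < dp.length := by omega
    have hialt : i - 1 < a.length := by omega
    have hcons : PySem.List.pyRange ((i : Nat) : Int) ((a.length : Int) + 1) 1
        = ((i : Nat) : Int) :: PySem.List.pyRange (((i : Nat) : Int) + 1) ((a.length : Int) + 1) 1 :=
      PySem.List.pyRange_one_cons (by omega)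
    rw [hcons, List.foldl_cons]
    have hrowi : dp.getD i [] = [(0 : Int)] ++ List.replicate b.length 0 := by
      rw [hzeros i (le_refl i) hin]; simp [List.replicate_succ]
    have hinner := inner_sim a b i hi1 hin b.length 1 dp maxl [0] (le_refl 1) (by omega)
      hdplen (by rw [hprev]; exact hprevlen) hrowi rfl hmax
    rw [Nat.cast_one] at hinner
    simp only [show (1 : Nat) - 1 = 0 from rfl, List.drop_zero] at hinner
    rw [List.getD_eq_getElem a ' ' hialt, hprev] at hinner
    rw [hinner]
    rw [List.drop_eq_getElem_cons hialt, List.foldl_cons]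
    have hbstep := pvRollRow_eq (a[i - 1]) b prev maxl
    have hRlen : ((0 : Int) :: (prev.zip b).map
        (fun pc => if a[i - 1] == pc.2 then pc.1 + 1 else 0)).length = b.length + 1 := by
      simp [List.length_zip, hprevlen]
    have hM : (0 : Int) ≤ ((prev.zip b).map
        (fun pc => if a[i - 1] == pc.2 then pc.1 + 1 else 0)).foldl (fun acc v => max acc v) maxl :=
      le_trans hmax (le_foldl_max' _ _)
    have hgetnew : ((dp.set i ([0] ++ (prev.zip b).map
          (fun pc => if a[i - 1] == pc.2 then pc.1 + 1 else 0))).getD (i + 1 - 1) [])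
        = (0 : Int) :: (prev.zip b).map (fun pc => if a[i - 1] == pc.2 then pc.1 + 1 else 0) := by
      simp [List.getD_eq_getElem?_getD, hilt]
    have := ih (i + 1)
      (dp.set i ([0] ++ (prev.zip b).map (fun pc => if a[i - 1] == pc.2 then pc.1 + 1 else 0)))
      (((prev.zip b).map (fun pc => if a[i - 1] == pc.2 then pc.1 + 1 else 0)).foldl
        (fun acc v => max acc v) maxl)
      ((0 : Int) :: (prev.zip b).map (fun pc => if a[i - 1] == pc.2 then pc.1 + 1 else 0))
      (by omega) (by omega) (by simpa using hdplen)
      hgetnew hRlen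
      (by
        intro k hk1 hk2
        rw [List.getD_eq_getElem?_getD, List.getElem?_set_ne (by omega : i ≠ k),
          ← List.getD_eq_getElem?_getD]
        exact hzeros k (by omega) hk2)
      hM
    have hic : ((i : Int) + 1) = ((i + 1 : Nat) : Int) := by push_cast; ring
    rw [hic, this, hbstep]
    have hii : i - 1 + 1 = i := by omega
    simp [hii]

-- A's lcs_length = rolling fold
lemma pvA_lcs_eq_roll (a b : List Char) : pvA_lcs a b = pvRoll_lcs a b := by
  simp only [pvA_lcs, pvRoll_lcs]
  have hdp : (PySem.List.pyRange 0 ((a.length : Int) + 1) 1).map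
      (fun _ => List.replicate ((b.length : Int) + 1).toNat (0 : Int))
      = List.replicate (a.length + 1) (List.replicate (b.length + 1) 0) := by
    rw [List.map_const']
    have h1 : (PySem.List.pyRange 0 ((a.length : Int) + 1) 1).length = a.length + 1 := by
      rw [PySem.List.length_pyRange_one]; omega
    have h2 : ((b.length : Int) + 1).toNat = b.length + 1 := by omega
    rw [h1, h2]
  rw [hdp]
  have h := outer_sim a b a.length 1
    (List.replicate (a.length + 1) (List.replicate (b.length + 1) 0)) 0
    (List.replicate (b.length + 1) 0)
    (le_refl 1) (by omega) (by simp)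
    (by simp) (by simp)
    (by intro k _ hk2; simp [List.getD_eq_getElem?_getD, Nat.lt_succ_of_le hk2])
    (le_refl 0)
  rw [Nat.cast_one] at h
  simpa using h

-- the rolling fold computes the grid maximum
lemma roll_row_of (a b : List Char) (p : Nat) (hp : p < a.length) :
    (0 : Int) :: ((((List.range (b.length + 1)).map (csuf a b p)).zip b).map
      (fun pc => if a[p] == pc.2 then pc.1 + 1 else 0))
    = (List.range (b.length + 1)).map (csuf a b (p + 1)) := by
  apply List.ext_getElem
  · simp [List.length_zip]
  · intro k h1 h2
    cases k with
    | zero =>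
      simp [csuf_zero_right]
    | succ k =>
      have hk : k < b.length := by simpa [List.length_zip] using h1
      have hkr : k < (List.range (b.length + 1)).length := by simp; omega
      simp only [List.getElem_cons_succ, List.getElem_map, List.getElem_zip,
        List.getElem_range, csuf_succ]
      rw [List.getD_eq_getElem a ' ' hp, List.getD_eq_getElem b ' ' hk]

lemma roll_inv (a b : List Char) :
    ∀ (t p : Nat), p + t = a.length →
    ∀ best : Int,
    (0 ≤ best ∧ (∀ i j, i ≤ p → j ≤ b.length → csuf a b i j ≤ best) ∧
      (∃ i j, i ≤ p ∧ j ≤ b.length ∧ best = csuf a b i j)) →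
    pvGridMax a b ((a.drop p).foldl (fun s ca => pvRollRow ca b s.1 s.2)
      ((List.range (b.length + 1)).map (csuf a b p), best)).2 := by
  intro t
  induction t with
  | zero =>
    intro p hp best ⟨h0, h1, h2⟩
    have : p = a.length := by omega
    subst this
    rw [List.drop_eq_nil_of_le (le_refl _), List.foldl_nil]
    exact ⟨h0, h1, h2⟩
  | succ t ih =>
    intro p hp best ⟨h0, h1, h2⟩
    have hpa : p < a.length := by omega
    rw [List.drop_eq_getElem_cons hpa, List.foldl_cons, pvRollRow_eq, roll_row_of a b p hpa]
    set L := ((((List.range (b.length + 1)).map (csuf a b p)).zip b).map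
      (fun pc => if a[p] == pc.2 then pc.1 + 1 else 0)) with hL
    have hLlen : L.length = b.length := by simp [hL, List.length_zip]
    have hLget : ∀ k (hk : k < b.length), L[k]'(by omega) = csuf a b (p + 1) (k + 1) := by
      intro k hk
      have := congrArg (fun l => l[k + 1]?) (roll_row_of a b p hpa)
      simp only [List.getElem?_cons_succ] at this
      have hkL : k < L.length := by omega
      have hkr : k + 1 < (List.range (b.length + 1)).length := by simp; omega
      rw [List.getElem?_eq_getElem hkL, List.getElem?_eq_getElem (by simpa using hkr)] at this
      simpa using this
    apply ih (p + 1) (by omega)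
    refine ⟨le_trans h0 (le_foldl_max' _ _), ?_, ?_⟩
    · intro i j hi hj
      rcases Nat.lt_or_ge i (p + 1) with hip | hip
      · exact le_trans (h1 i j (by omega) hj) (le_foldl_max' _ _)
      · have : i = p + 1 := by omega
        subst this
        cases j with
        | zero =>
          rw [csuf_zero_right]
          exact le_trans h0 (le_foldl_max' _ _)
        | succ j =>
          have hjb : j < b.length := by omega
          have : csuf a b (p + 1) (j + 1) ∈ L := by
            rw [← hLget j hjb]
            exact List.getElem_mem _
          exact mem_le_foldl_max L best _ this
    · rcases foldl_max_cases L best with h | h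
      · obtain ⟨i, j, hi, hj, he⟩ := h2
        exact ⟨i, j, by omega, hj, by rw [h]; exact he⟩
      · obtain ⟨k, hk, he⟩ := List.getElem_of_mem h
        have hkb : k < b.length := by omega
        rw [hLget k hkb] at he
        exact ⟨p + 1, k + 1, by omega, by omega, he.symm⟩

lemma pvA_lcs_pvGridMax (a b : List Char) : pvGridMax a b (pvA_lcs a b) := by
  rw [pvA_lcs_eq_roll]
  have hrow0 : (List.range (b.length + 1)).map (csuf a b 0)
      = List.replicate (b.length + 1) (0 : Int) := by
    apply List.ext_getElem <;> simp [csuf_zero_left]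
  have := roll_inv a b a.length 0 (by omega) 0
    ⟨le_refl 0, by intro i j hi hj; interval_cases i; simp [csuf_zero_left],
      ⟨0, 0, by omega, by omega, (csuf_zero_left a b 0).symm⟩⟩
  rw [hrow0] at this
  simpa [pvRoll_lcs] using this

-- ---------- B side: the diagonal walks compute the grid maximum ----------

lemma walk_inv (t b : List Char) :
    ∀ (fuel : Nat) (i j run best : Int),
    ((t.length : Int) - i).toNat = fuel →
    0 ≤ i → 0 ≤ j → i.toNat ≤ t.length → j.toNat ≤ b.length →
    run = csuf t b i.toNat j.toNat → 0 ≤ best →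
    best ≤ pvDiagWalk t b i j run best ∧
    (∀ k : Nat, i + k < (t.length : Int) → j + k < (b.length : Int) →
      csuf t b (i.toNat + k + 1) (j.toNat + k + 1) ≤ pvDiagWalk t b i j run best) ∧
    (pvDiagWalk t b i j run best = best ∨
      ∃ k : Nat, i + k < (t.length : Int) ∧ j + k < (b.length : Int) ∧
        pvDiagWalk t b i j run best = csuf t b (i.toNat + k + 1) (j.toNat + k + 1)) := by
  intro fuel
  induction fuel with
  | zero =>
    intro i j run best hf hi hj hit hjb hrun hbest
    have hni : ¬ (i < (t.length : Int) ∧ j < (b.length : Int)) := by omega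
    rw [pvDiagWalk, dif_neg hni]
    exact ⟨le_refl _, by intro k hk1 hk2; omega, Or.inl rfl⟩
  | succ fuel ih =>
    intro i j run best hf hi hj hit hjb hrun hbest
    by_cases hc : i < (t.length : Int) ∧ j < (b.length : Int)
    · obtain ⟨hc1, hc2⟩ := hc
      have hitl : i.toNat < t.length := by omega
      have hjbl : j.toNat < b.length := by omega
      have hgt : PySem.List.pyGetD t i ' ' = t.getD i.toNat ' ' := by
        rw [PySem.List.pyGetD_eq_getElem t ' ' hi (by exact_mod_cast hc1),
          List.getD_eq_getElem t ' ' hitl]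
      have hgb : PySem.List.pyGetD b j ' ' = b.getD j.toNat ' ' := by
        rw [PySem.List.pyGetD_eq_getElem b ' ' hj (by exact_mod_cast hc2),
          List.getD_eq_getElem b ' ' hjbl]
      have hsucc : csuf t b (i.toNat + 1) (j.toNat + 1)
          = if t.getD i.toNat ' ' == b.getD j.toNat ' ' then run + 1 else 0 := by
        rw [csuf_succ, ← hrun]
      have hi1 : (i + 1).toNat = i.toNat + 1 := by omega
      have hj1 : (j + 1).toNat = j.toNat + 1 := by omega
      rw [pvDiagWalk, dif_pos ⟨hc1, hc2⟩]
      by_cases heq : PySem.List.pyGetD t i ' ' == PySem.List.pyGetD b j ' '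
      · simp only [heq, if_true]
        set best' := if run + 1 > best then run + 1 else best with hb'
        have hrun' : run + 1 = csuf t b (i + 1).toNat (j + 1).toNat := by
          rw [hi1, hj1, hsucc, if_pos (by rw [← hgt, ← hgb]; exact heq)]
        have hbest' : 0 ≤ best' := by
          rw [hb']; split_ifs with h
          · have := csuf_nonneg t b i.toNat j.toNat; omega
          · exact hbest
        have := ih (i + 1) (j + 1) (run + 1) best' (by omega) (by omega) (by omega)
          (by omega) (by omega) hrun' hbest'
        obtain ⟨w1, w2, w3⟩ := this
        refine ⟨le_trans (by rw [hb']; split_ifs <;> omega) w1, ?_, ?_⟩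
        · intro k hk1 hk2
          cases k with
          | zero =>
            have : csuf t b (i.toNat + 0 + 1) (j.toNat + 0 + 1) = run + 1 := by
              rw [hrun', hi1, hj1]
            rw [this]
            exact le_trans (by rw [hb']; split_ifs <;> omega) w1
          | succ k =>
            have := w2 k (by omega) (by omega)
            rw [hi1, hj1] at this
            have harith : i.toNat + 1 + k + 1 = i.toNat + (k + 1) + 1 := by omega
            have harith2 : j.toNat + 1 + k + 1 = j.toNat + (k + 1) + 1 := by omega
            rw [harith, harith2] at this
            exact this
        · rcases w3 with h | ⟨k, hk1, hk2, hk3⟩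
          · rw [h, hb']
            split_ifs with hgtc
            · right
              exact ⟨0, by omega, by omega, by rw [hrun', hi1, hj1]⟩
            · left; rfl
          · right
            refine ⟨k + 1, by omega, by omega, ?_⟩
            rw [hk3, hi1, hj1, show i.toNat + 1 + k + 1 = i.toNat + (k + 1) + 1 from by omega,
              show j.toNat + 1 + k + 1 = j.toNat + (k + 1) + 1 from by omega]
      · simp only [heq, Bool.false_eq_true, if_false]
        have hrun' : (0 : Int) = csuf t b (i + 1).toNat (j + 1).toNat := by
          rw [hi1, hj1, hsucc, if_neg (by rw [← hgt, ← hgb]; exact heq)]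
        have := ih (i + 1) (j + 1) 0 best (by omega) (by omega) (by omega)
          (by omega) (by omega) hrun' hbest
        obtain ⟨w1, w2, w3⟩ := this
        refine ⟨w1, ?_, ?_⟩
        · intro k hk1 hk2
          cases k with
          | zero =>
            have : csuf t b (i.toNat + 0 + 1) (j.toNat + 0 + 1) = 0 := by
              rw [← hi1, ← hj1, ← hrun']
            rw [this]
            exact le_trans hbest w1
          | succ k =>
            have := w2 k (by omega) (by omega)
            rw [hi1, hj1] at this
            have harith : i.toNat + 1 + k + 1 = i.toNat + (k + 1) + 1 := by omega
            have harith2 : j.toNat + 1 + k + 1 = j.toNat + (k + 1) + 1 := by omega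
            rw [harith, harith2] at this
            exact this
        · rcases w3 with h | ⟨k, hk1, hk2, hk3⟩
          · exact Or.inl h
          · right
            refine ⟨k + 1, by omega, by omega, ?_⟩
            rw [hk3, hi1, hj1, show i.toNat + 1 + k + 1 = i.toNat + (k + 1) + 1 from by omega,
              show j.toNat + 1 + k + 1 = j.toNat + (k + 1) + 1 from by omega]
    · rw [pvDiagWalk, dif_neg hc]
      exact ⟨le_refl _, by intro k hk1 hk2; omega, Or.inl rfl⟩

-- facts about the starting cell of the diagonal d
lemma diag_start (t b : List Char) (d : Int) (hd1 : -((b.length : Int) - 1) ≤ d)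
    (hd2 : d < (t.length : Int)) :
    let j := max 0 (-d)
    0 ≤ j + d ∧ 0 ≤ j ∧ (j + d).toNat ≤ t.length ∧ j.toNat ≤ b.length ∧
      csuf t b (j + d).toNat j.toNat = 0 := by
  intro j
  have hj : j = max 0 (-d) := rfl
  refine ⟨by omega, by omega, by omega, by omega, ?_⟩
  rcases (by omega : 0 ≤ d ∨ d < 0) with h | h
  · have : j.toNat = 0 := by omega
    rw [this, csuf_zero_right]
  · have : (j + d).toNat = 0 := by omega
    rw [this, csuf_zero_left]

-- one diagonal step of the fold
def pvDiagStep (t b : List Char) (best d : Int) : Int :=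
  pvDiagWalk t b (max 0 (-d) + d) (max 0 (-d)) 0 best

lemma fold_diag_mono (t b : List Char) (l : List Int)
    (hl : ∀ d ∈ l, -((b.length : Int) - 1) ≤ d ∧ d < (t.length : Int)) (b0 : Int) (hb0 : 0 ≤ b0) :
    b0 ≤ l.foldl (pvDiagStep t b) b0 ∧ 0 ≤ l.foldl (pvDiagStep t b) b0 ∧
    (l.foldl (pvDiagStep t b) b0 = b0 ∨
      ∃ i j, i ≤ t.length ∧ j ≤ b.length ∧ l.foldl (pvDiagStep t b) b0 = csuf t b i j) := by
  induction l generalizing b0 with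
  | nil => exact ⟨le_refl _, hb0, Or.inl rfl⟩
  | cons d ds ih =>
    have hd := hl d (List.mem_cons_self)
    obtain ⟨hs1, hs2, hs3, hs4, hs5⟩ := diag_start t b d hd.1 hd.2
    have hw := walk_inv t b ((t.length : Int) - (max 0 (-d) + d)).toNat
      (max 0 (-d) + d) (max 0 (-d)) 0 b0 rfl hs1 hs2 hs3 hs4 hs5.symm hb0
    obtain ⟨w1, w2, w3⟩ := hw
    have hstep : pvDiagStep t b b0 d = pvDiagWalk t b (max 0 (-d) + d) (max 0 (-d)) 0 b0 := rfl
    have hnn : 0 ≤ pvDiagStep t b b0 d := by rw [hstep]; exact le_trans hb0 w1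
    have := ih (fun x hx => hl x (List.mem_cons_of_mem _ hx)) (pvDiagStep t b b0 d) hnn
    obtain ⟨i1, i2, i3⟩ := this
    rw [List.foldl_cons]
    refine ⟨le_trans (by rw [hstep]; exact w1) i1, i2, ?_⟩
    rcases i3 with h | h
    · rw [h, hstep]
      rcases w3 with h' | ⟨k, hk1, hk2, hk3⟩
      · exact Or.inl h'
      · exact Or.inr ⟨_, _, by omega, by omega, hk3⟩
    · exact Or.inr h

lemma fold_diag_upper (t b : List Char) (i' j' : Nat) (hi' : i' < t.length) (hj' : j' < b.length) :
    ∀ (l1 : List Int) (b0 : Int), 0 ≤ b0 →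
    (∀ d ∈ l1, -((b.length : Int) - 1) ≤ d ∧ d < (t.length : Int)) →
    csuf t b (i' + 1) (j' + 1) ≤
      (l1 ++ ((i' : Int) - (j' : Int)) :: PySem.List.pyRange ((i' : Int) - (j' : Int) + 1) (t.length : Int) 1).foldl (pvDiagStep t b) b0 := by
  intro l1 b0 hb0 hl1
  rw [List.foldl_append, List.foldl_cons]
  set d : Int := (i' : Int) - (j' : Int) with hd
  have hd1 : -((b.length : Int) - 1) ≤ d := by omega
  have hd2 : d < (t.length : Int) := by omega
  have hb1 : 0 ≤ l1.foldl (pvDiagStep t b) b0 := (fold_diag_mono t b l1 hl1 b0 hb0).2.1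
  obtain ⟨hs1, hs2, hs3, hs4, hs5⟩ := diag_start t b d hd1 hd2
  have hw := walk_inv t b ((t.length : Int) - (max 0 (-d) + d)).toNat
    (max 0 (-d) + d) (max 0 (-d)) 0 (l1.foldl (pvDiagStep t b) b0) rfl hs1 hs2 hs3 hs4 hs5.symm hb1
  obtain ⟨w1, w2, -⟩ := hw
  -- the cell (i', j') lies on diagonal d at distance k from its start
  have hjk : (max 0 (-d)).toNat ≤ j' := by omega
  set k : Nat := j' - (max 0 (-d)).toNat with hk
  have hcell := w2 k (by omega) (by omega)
  have harith : (max 0 (-d) + d).toNat + k + 1 = i' + 1 := by omega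
  have harith2 : (max 0 (-d)).toNat + k + 1 = j' + 1 := by omega
  rw [harith, harith2] at hcell
  calc csuf t b (i' + 1) (j' + 1) ≤ pvDiagWalk t b (max 0 (-d) + d) (max 0 (-d)) 0 (l1.foldl (pvDiagStep t b) b0) := hcell
    _ ≤ _ := (fold_diag_mono t b _ (by intro x hx; rw [PySem.List.mem_pyRange_one] at hx; omega) _ (le_trans hb1 w1)).1

lemma pvDiag_lcs_pvGridMax (t b : List Char) : pvGridMax t b (pvDiag_lcs t b) := by
  have hrange : ∀ d ∈ PySem.List.pyRange (-((b.length : Int) - 1)) (t.length : Int) 1,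
      -((b.length : Int) - 1) ≤ d ∧ d < (t.length : Int) := by
    intro d hd; rw [PySem.List.mem_pyRange_one] at hd; exact hd
  have hmain := fold_diag_mono t b _ hrange 0 (le_refl 0)
  have hdef : pvDiag_lcs t b
      = (PySem.List.pyRange (-((b.length : Int) - 1)) (t.length : Int) 1).foldl (pvDiagStep t b) 0 := by
    simp only [pvDiag_lcs]; rfl
  refine ⟨by rw [hdef]; exact hmain.2.1, ?_, ?_⟩
  · intro i j hi hj
    cases i with
    | zero => rw [csuf_zero_left, hdef]; exact hmain.2.1
    | succ i =>
      cases j with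
      | zero => rw [csuf_zero_right, hdef]; exact hmain.2.1
      | succ j =>
        have hi' : i < t.length := by omega
        have hj' : j < b.length := by omega
        have h1 := PySem.List.pyRange_one_append (-((b.length : Int) - 1)) ((i : Int) - (j : Int)) (t.length : Int) (by omega) (by omega)
        have h2 : PySem.List.pyRange ((i : Int) - (j : Int)) (t.length : Int) 1
            = ((i : Int) - (j : Int)) :: PySem.List.pyRange ((i : Int) - (j : Int) + 1) (t.length : Int) 1 :=
          PySem.List.pyRange_one_cons (by omega)
        rw [hdef, h1, h2]
        exact fold_diag_upper t b i j hi' hj' _ 0 (le_refl 0)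
          (by intro x hx; rw [PySem.List.mem_pyRange_one] at hx; omega)
  · rw [hdef]
    rcases hmain.2.2 with h | h
    · exact ⟨0, 0, by omega, by omega, by rw [h, csuf_zero_left]⟩
    · exact h

lemma pvA_lcs_eq_diag (a b : List Char) : pvA_lcs a b = pvDiag_lcs a b :=
  pvGridMax_unique a b _ _ (pvA_lcs_pvGridMax a b) (pvDiag_lcs_pvGridMax a b)

-- A's map-then-filter pipeline = B's single accumulating loop
lemma filter_map_eq_foldl (f : String → Int) (l : List String) (acc : List (String × Int)) :
    acc ++ (l.map (fun c => (c, f c))).filter (fun x => decide (x.2 > 0))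
    = l.foldl (fun acc c => let s := f c; if s > 0 then acc ++ [(c, s)] else acc) acc := by
  induction l generalizing acc with
  | nil => simp
  | cons c cs ih =>
    by_cases h : f c > 0 <;> simp [h, ← ih]

-- ===== VERDICT (by name: the statement is the Claim_ definition above) =====
theorem get_left_longest_common_subsequence_spec : Claim_equal_get_left_longest_common_subsequence := by
  intro text candidates _
  unfold Spec_get_left_longest_common_subsequence
  unfold get_left_longest_common_subsequence get_left_longest_common_subsequence_alt
  by_cases hc : text.toList = [] ∨ candidates = []
  · rw [if_pos hc, if_pos hc]
  · rw [if_neg hc, if_neg hc]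
    have hpipe := filter_map_eq_foldl
      (fun c => pvDiag_lcs (PySem.Chars.lower text.toList) (PySem.Chars.lower c.toList)) candidates []
    simp only [List.nil_append] at hpipe
    simp only [pvA_lcs_eq_diag]
    rw [hpipe]
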